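-- pv_equiv track=rewrite | github.com/samw430/cloud_blast | source/blast_example.py | score_diagonal
-- ===== SOURCE A (Python) =====
-- def score_diagonal(search_string, subword_ktups, k):
-- 	match_regions = []
-- 	previous_region = None
--
-- 	for i in range(0, len(search_string)-k+1):
-- 		sub_search_string = search_string[i:i+k]
-- 		match = False
-- 		if sub_search_string in subword_ktups:
-- 			match = True
--
-- 		if match:
-- 			if previous_region:
-- 				previous_region_end = previous_region[1]
-- 				gap = i - previous_region_end
-- 				if gap > 1:
-- 					match_regions.append(previous_region)
-- 					previous_region = (i, i+k-1)
-- 				else: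
-- 					previous_region = (previous_region[0], i+k-1)
-- 			else:
-- 				previous_region = (i, i+k-1)
--
-- 	if previous_region:
-- 		match_regions.append(previous_region)
--
-- 	score = 0
-- 	for region in match_regions:
-- 		score = score + region[1] - region[0]
--
-- 	return score
-- ===== SOURCE B (Python) =====
-- def score_diagonal(search_string, subword_ktups, k):
-- 	score = 0
-- 	prev = None
-- 	for i in range(0, len(search_string)-k+1):
-- 		if search_string[i:i+k] in subword_ktups:
-- 			if prev is not None and i - prev <= k:
-- 				score += i - prev
-- 			else:
-- 				score += k - 1
-- 			prev = i
-- 	return score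
-- ===== Notes on version B (the rewrite author's own statement) =====
-- stated objective: simpler
-- what changed: Replaced A's two-phase scheme (build a list of merged (start,end) interval tuples, then a second loop summing their spans) by a single scan that keeps only an integer score and the last matched position, adding i-prev on a merge and k-1 on a new region.
import Mathlib
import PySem

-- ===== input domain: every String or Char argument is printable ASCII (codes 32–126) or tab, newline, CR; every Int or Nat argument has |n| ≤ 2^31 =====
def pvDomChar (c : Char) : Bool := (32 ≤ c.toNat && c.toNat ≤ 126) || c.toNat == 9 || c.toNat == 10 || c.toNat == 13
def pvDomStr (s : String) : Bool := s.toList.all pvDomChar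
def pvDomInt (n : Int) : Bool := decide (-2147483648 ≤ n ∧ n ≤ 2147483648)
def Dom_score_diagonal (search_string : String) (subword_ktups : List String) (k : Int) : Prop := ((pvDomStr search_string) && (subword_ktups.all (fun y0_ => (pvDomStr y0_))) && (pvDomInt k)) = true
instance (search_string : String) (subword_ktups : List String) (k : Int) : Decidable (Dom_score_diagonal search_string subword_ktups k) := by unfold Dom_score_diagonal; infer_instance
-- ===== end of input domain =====

-- B replaces A's region-tuple list and second summation loop by a single scan keeping
-- only an integer score and the last matched position (simpler, O(1) extra space).

-- ===== PORT A =====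
-- loop body of A's first for-loop (state: (match_regions, previous_region))
def pvStepA (search_string : String) (subword_ktups : List String) (k : Int)
    (st : List (Int × Int) × Option (Int × Int)) (i : Int) :
    List (Int × Int) × Option (Int × Int) :=
  let sub_search_string := PySem.Str.slice search_string (some i) (some (i + k))
  if subword_ktups.contains sub_search_string then
    match st.2 with
    | some previous_region =>
        let gap := i - previous_region.2
        if gap > 1 then (st.1 ++ [previous_region], some (i, i + k - 1))
        else (st.1, some (previous_region.1, i + k - 1))
    | none => (st.1, some (i, i + k - 1))
  else st

def score_diagonal (search_string : String) (subword_ktups : List String) (k : Int) : Int :=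
  let st := (PySem.List.pyRange 0 (PySem.Str.len search_string - k + 1) 1).foldl
      (pvStepA search_string subword_ktups k) ([], none)
  let match_regions := match st.2 with
    | some previous_region => st.1 ++ [previous_region]
    | none => st.1
  match_regions.foldl (fun score region => score + region.2 - region.1) 0

-- ===== PORT B =====
-- loop body of B's single scan (state: (score, prev))
def pvStepB (search_string : String) (subword_ktups : List String) (k : Int)
    (st : Int × Option Int) (i : Int) : Int × Option Int :=
  if subword_ktups.contains (PySem.Str.slice search_string (some i) (some (i + k))) then
    match st.2 with
    | some prev =>
        if i - prev ≤ k then (st.1 + (i - prev), some i)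
        else (st.1 + (k - 1), some i)
    | none => (st.1 + (k - 1), some i)
  else st

def score_diagonal_alt (search_string : String) (subword_ktups : List String) (k : Int) : Int :=
  ((PySem.List.pyRange 0 (PySem.Str.len search_string - k + 1) 1).foldl
      (pvStepB search_string subword_ktups k) (0, none)).1

-- ===== PRECONDITION & SPEC =====
def Spec_score_diagonal (search_string : String) (subword_ktups : List String) (k : Int) (out : Int) : Prop := out = score_diagonal_alt search_string subword_ktups k
instance (search_string : String) (subword_ktups : List String) (k : Int) (out : Int) : Decidable (Spec_score_diagonal search_string subword_ktups k out) := by unfold Spec_score_diagonal; infer_instance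

-- ===== CLAIM (what is proved, stated in full; the proofs are below) =====
def Claim_equal_score_diagonal : Prop := ∀ (search_string : String) (subword_ktups : List String) (k : Int), Dom_score_diagonal search_string subword_ktups k → Spec_score_diagonal search_string subword_ktups k (score_diagonal search_string subword_ktups k)

-- ===== LEMMAS AND PROOFS =====

-- sum of region spans, as A's second loop computes it from 0
def pvSumR (rs : List (Int × Int)) : Int :=
  rs.foldl (fun score region => score + region.2 - region.1) 0

-- span still pending in A's previous_region
def pvSpan (pr : Option (Int × Int)) : Int :=
  match pr with
  | some p => p.2 - p.1
  | none => 0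

lemma pvSumR_append_single (rs : List (Int × Int)) (p : Int × Int) :
    pvSumR (rs ++ [p]) = pvSumR rs + p.2 - p.1 := by
  simp only [pvSumR, List.foldl_append, List.foldl]

lemma pvSumR_close (rs : List (Int × Int)) (pr : Option (Int × Int)) :
    pvSumR (match pr with | some p => rs ++ [p] | none => rs) = pvSumR rs + pvSpan pr := by
  cases pr with
  | none => simp [pvSpan]
  | some p => simp only [pvSpan, pvSumR_append_single]; ring

-- main invariant: B's running (score, prev) tracks A's (regions, previous_region)
lemma pv_fold_inv (s : String) (tups : List String) (k : Int) :
    ∀ (l : List Int) (rs : List (Int × Int)) (prA : Option (Int × Int)) (sc : Int),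
      sc = pvSumR rs + pvSpan prA →
      (l.foldl (pvStepB s tups k) (sc, prA.map (fun p => p.2 - k + 1))).1 =
        (let fa := l.foldl (pvStepA s tups k) (rs, prA)
         pvSumR (match fa.2 with | some p => fa.1 ++ [p] | none => fa.1)) := by
  intro l
  induction l with
  | nil =>
      intro rs prA sc hsc
      simp only [List.foldl]
      rw [pvSumR_close]
      exact hsc
  | cons i t ih =>
      intro rs prA sc hsc
      simp only [List.foldl]
      by_cases hm : tups.contains (PySem.Str.slice s (some i) (some (i + k))) = true
      · cases prA with
        | none =>
            simp only [pvStepA, pvStepB, hm, if_pos, Option.map_none]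
            have h := ih rs (some (i, i + k - 1)) (sc + (k - 1))
                (by simp [pvSpan] at *; omega)
            simp only [Option.map_some] at h
            have he : i + k - 1 - k + 1 = i := by ring
            rw [he] at h
            exact h
        | some p =>
            by_cases hg : i - p.2 > 1
            · have hB : ¬ (i - (p.2 - k + 1) ≤ k) := by omega
              simp only [pvStepA, pvStepB, hm, if_pos, Option.map_some, hg, hB,
                if_false]
              have h := ih (rs ++ [p]) (some (i, i + k - 1)) (sc + (k - 1))
                  (by simp [pvSpan, pvSumR_append_single] at *; omega)
              simp only [Option.map_some] at h
              have he : i + k - 1 - k + 1 = i := by ring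
              rw [he] at h
              exact h
            · have hB : i - (p.2 - k + 1) ≤ k := by omega
              simp only [pvStepA, pvStepB, hm, if_pos, Option.map_some, hg, if_false, hB]
              have h := ih rs (some (p.1, i + k - 1)) (sc + (i - (p.2 - k + 1)))
                  (by simp [pvSpan] at *; omega)
              simp only [Option.map_some] at h
              have he : i + k - 1 - k + 1 = i := by ring
              rw [he] at h
              exact h
      · simp only [pvStepA, pvStepB, hm, if_neg, Bool.false_eq_true, not_false_iff]
        exact ih rs prA sc hsc

-- ===== VERDICT (by name: the statement is the Claim_ definition above) =====
theorem score_diagonal_spec : Claim_equal_score_diagonal := by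
  intro s tups k _
  unfold Spec_score_diagonal score_diagonal score_diagonal_alt
  have h := pv_fold_inv s tups k
    (PySem.List.pyRange 0 (PySem.Str.len s - k + 1) 1) [] none 0 (by simp [pvSumR, pvSpan])
  simp only [Option.map_none] at h
  rw [h]
  rfl
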